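-- pv_equiv track=rewrite | github.com/vharatian/swe-bench-extractor | run_in_container.py | create_cmd
-- ===== SOURCE A (Python) =====
-- def create_cmd(cmd, tests):
--     integration_tests = [t for t in tests if t.endswith(".java") and "IT" in t.split("/")[-1]]
--     unit_tests = [t for t in tests if t.endswith("Test.java")]
--     ignored_tests = [t for t in tests if t not in integration_tests + unit_tests]
--
--     if integration_tests:
--         integration_tests = [t.split("/")[-1].replace(".java", "") for t in integration_tests]
--         integration_tests = ','.join(integration_tests)
--     else:
--         integration_tests = "NO_INTEGRATION_TESTS"
--
--     if unit_tests:
--         unit_tests = [t.split("/")[-1].replace(".java", "") for t in unit_tests]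
--         unit_tests = ','.join(unit_tests)
--     else:
--         unit_tests = "NO_UNIT_TESTS"
--
--     cmd = cmd.replace("<unit_tests>", unit_tests).replace("<integration_tests>", integration_tests)
--
--     return cmd, ignored_tests
-- ===== SOURCE B (Python) =====
-- def create_cmd(cmd, tests):
--     # Single backward pass that maintains the two comma-joined name strings
--     # directly (no intermediate category lists, no join, no membership scan);
--     # the ignored list is built back-to-front and reversed once.
--     it_s = None
--     ut_s = None
--     ignored = []
--     for t in reversed(tests):
--         base = t.split("/")[-1]
--         name = base.replace(".java", "")
--         hit = False
--         if t.endswith(".java") and "IT" in base: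
--             it_s = name if it_s is None else name + "," + it_s
--             hit = True
--         if t.endswith("Test.java"):
--             ut_s = name if ut_s is None else name + "," + ut_s
--             hit = True
--         if not hit:
--             ignored.append(t)
--     ignored.reverse()
--     if it_s is None:
--         it_s = "NO_INTEGRATION_TESTS"
--     if ut_s is None:
--         ut_s = "NO_UNIT_TESTS"
--     return cmd.replace("<unit_tests>", ut_s).replace("<integration_tests>", it_s), ignored
-- ===== Notes on version B (the rewrite author's own statement) =====
-- stated objective: alternative
-- what changed: Replaces A's three list comprehensions plus an O(n^2) membership test against the concatenated category lists with one backward pass that maintains the two comma-joined name strings directly as accumulators (no intermediate category lists, no join step) and builds the ignored list back-to-front.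
import Mathlib
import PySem

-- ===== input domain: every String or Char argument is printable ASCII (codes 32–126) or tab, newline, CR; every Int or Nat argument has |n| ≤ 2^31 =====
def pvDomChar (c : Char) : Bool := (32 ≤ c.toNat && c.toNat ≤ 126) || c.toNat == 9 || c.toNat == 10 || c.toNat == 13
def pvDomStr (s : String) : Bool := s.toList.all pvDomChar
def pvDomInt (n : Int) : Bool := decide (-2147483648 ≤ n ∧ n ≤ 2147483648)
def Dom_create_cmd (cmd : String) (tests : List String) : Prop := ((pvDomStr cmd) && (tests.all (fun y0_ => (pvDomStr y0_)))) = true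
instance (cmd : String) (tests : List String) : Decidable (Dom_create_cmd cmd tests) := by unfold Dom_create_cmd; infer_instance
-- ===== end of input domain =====

-- B replaces A's three comprehension scans and concatenated-list membership test with one backward pass
-- that maintains the two comma-joined name strings directly; proved equal on all inputs (A is total).


-- ===== PORT A =====
-- t.split("/")[-1]: split on "/" never fails (sep ≠ "") and never yields [], so the [-1] never raises
def aBase (t : String) : String := ((PySem.Str.split? t "/").getD []).getLastD ""
def aIsInt (t : String) : Bool := PySem.Str.endswith t ".java" && PySem.Str.isIn "IT" (aBase t)
def aIsUnit (t : String) : Bool := PySem.Str.endswith t "Test.java"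
-- t.split("/")[-1].replace(".java", "")
def aName (t : String) : String := PySem.Str.replace (aBase t) ".java" ""

def create_cmd (cmd : String) (tests : List String) : String × List String :=
  let integration_tests := tests.filter (fun t => aIsInt t)
  let unit_tests := tests.filter (fun t => aIsUnit t)
  let ignored_tests := tests.filter (fun t => !(decide (t ∈ integration_tests ++ unit_tests)))
  let itS := if integration_tests = [] then "NO_INTEGRATION_TESTS"
             else PySem.Str.join "," (integration_tests.map aName)
  let utS := if unit_tests = [] then "NO_UNIT_TESTS"
             else PySem.Str.join "," (unit_tests.map aName)
  (PySem.Str.replace (PySem.Str.replace cmd "<unit_tests>" utS) "<integration_tests>" itS, ignored_tests)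

-- ===== PORT B =====
-- Source B's loop-body locals: base, name, and the two predicates
def bBase (t : String) : String := ((PySem.Str.split? t "/").getD []).getLastD ""
def bIsInt (t : String) : Bool := PySem.Str.endswith t ".java" && PySem.Str.isIn "IT" (bBase t)
def bIsUnit (t : String) : Bool := PySem.Str.endswith t "Test.java"
def bName (t : String) : String := PySem.Str.replace (bBase t) ".java" ""

-- one iteration of Source B's loop over reversed(tests): the state is (it_s, ut_s, ignored);
-- `x if acc is None else x + "," + acc` prepends the name to the joined string being maintained
def bStep (s : Option String × Option String × List String) (t : String) :
    Option String × Option String × List String :=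
  ((if bIsInt t then
      some (match s.1 with | none => bName t | some acc => bName t ++ "," ++ acc)
    else s.1),
   (if bIsUnit t then
      some (match s.2.1 with | none => bName t | some acc => bName t ++ "," ++ acc)
    else s.2.1),
   (if !(bIsInt t || bIsUnit t) then s.2.2 ++ [t] else s.2.2))

def create_cmd_alt (cmd : String) (tests : List String) : String × List String :=
  let r := tests.reverse.foldl bStep (none, none, [])
  let ignored := r.2.2.reverse
  let itS := match r.1 with | none => "NO_INTEGRATION_TESTS" | some s => s
  let utS := match r.2.1 with | none => "NO_UNIT_TESTS" | some s => s
  (PySem.Str.replace (PySem.Str.replace cmd "<unit_tests>" utS) "<integration_tests>" itS, ignored)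

-- ===== PRECONDITION & SPEC =====
def Spec_create_cmd (cmd : String) (tests : List String) (out : String × List String) : Prop := out = create_cmd_alt cmd tests
instance (cmd : String) (tests : List String) (out : String × List String) : Decidable (Spec_create_cmd cmd tests out) := by unfold Spec_create_cmd; infer_instance

-- ===== CLAIM (what is proved, stated in full; the proofs are below) =====
def Claim_equal_create_cmd : Prop := ∀ (cmd : String) (tests : List String), Dom_create_cmd cmd tests → Spec_create_cmd cmd tests (create_cmd cmd tests)

-- ===== LEMMAS AND PROOFS =====

-- B's predicates and basename map are the same functions as A's
theorem bIsInt_eq : bIsInt = aIsInt := rfl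
theorem bIsUnit_eq : bIsUnit = aIsUnit := rfl
theorem bName_eq : bName = aName := rfl

theorem str_toList_inj (s t : String) (h : s.toList = t.toList) : s = t :=
  String.toList_injective h

-- ','.join over a singleton and over a cons (Python's join in prepend form)
theorem join_singleton (a : String) : PySem.Str.join "," [a] = a := by
  apply str_toList_inj
  simp [PySem.Str.join, PySem.Chars.join, List.intercalate]

theorem join_cons (a b : String) (l : List String) :
    PySem.Str.join "," (a :: b :: l) = a ++ "," ++ PySem.Str.join "," (b :: l) := by
  apply str_toList_inj
  simp [PySem.Str.join, String.toList_ofList, PySem.Chars.join, List.intercalate]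

-- the optional joined-string accumulator B maintains, as a function of the category list
def jopt (l : List String) : Option String :=
  match l with
  | [] => none
  | x :: xs => some (PySem.Str.join "," (x :: xs))

theorem jopt_cons (a : String) (l : List String) :
    jopt (a :: l) = some (match jopt l with | none => a | some acc => a ++ "," ++ acc) := by
  cases l with
  | nil => simp [jopt, join_singleton]
  | cons b xs => simp [jopt, join_cons]

-- B's backward pass computes the joined strings of A's two mapped filters and the reversed ignored filter
theorem bFold_eq (tests : List String) :
    tests.reverse.foldl bStep (none, none, []) =
      (jopt ((tests.filter (fun t => bIsInt t)).map bName),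
       jopt ((tests.filter (fun t => bIsUnit t)).map bName),
       (tests.filter (fun t => !(bIsInt t || bIsUnit t))).reverse) := by
  induction tests with
  | nil => simp [jopt]
  | cons t ts ih =>
    simp only [List.reverse_cons, List.foldl_append, List.foldl_cons, List.foldl_nil, ih,
      List.filter_cons]
    cases hi : bIsInt t <;> cases hu : bIsUnit t <;>
      simp [bStep, hi, hu, jopt_cons]

-- inside tests, membership in A's two filtered lists is the disjunction of the predicates
theorem mem_filters_iff (tests : List String) (t : String) (ht : t ∈ tests) :
    (t ∈ tests.filter (fun t => aIsInt t) ++ tests.filter (fun t => aIsUnit t)) ↔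
      (aIsInt t || aIsUnit t) = true := by
  simp [List.mem_filter, ht]

-- jopt's match-out equals A's if-on-emptiness over the same list
theorem jopt_match (l : List String) (d : String) :
    (match jopt l with | none => d | some s => s) =
      if l = [] then d else PySem.Str.join "," l := by
  cases l <;> simp [jopt]

-- ===== VERDICT (by name: the statement is the Claim_ definition above) =====
theorem create_cmd_spec : Claim_equal_create_cmd := by
  intro cmd tests _
  unfold Spec_create_cmd create_cmd create_cmd_alt
  rw [bFold_eq, bIsInt_eq, bIsUnit_eq, bName_eq]
  simp only [List.reverse_reverse, jopt_match, List.map_eq_nil_iff]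
  have hig : tests.filter
      (fun t => !(decide (t ∈ tests.filter (fun t => aIsInt t) ++ tests.filter (fun t => aIsUnit t)))) =
      tests.filter (fun t => !(aIsInt t || aIsUnit t)) := by
    apply List.filter_congr
    intro t ht
    simp [mem_filters_iff tests t ht]
  rw [hig]
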